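-- pv_equiv track=rewrite | github.com/igorkholod/InfoTheory | lab5.py | berger_check
-- ===== SOURCE A (Python) =====
-- def inverse(string):
--     return ''.join('0' if ch == '1' else '1' for ch in string)
--
-- def berger_check(_words):
--     is_error = []
--     for word in _words:
--         k = 0
--         for i in range(1, len(word)):
--             if 2 ** i - 1 >= len(word) - i:
--                 k = len(word) - i
--                 break
--         info = word[:k]
--         control = word[k:]
--         control_int = int(control, 2)
--         info_sum_bin = bin(sum(map(int, info)))[2:]
--         info_sum_int = int(inverse(''.join('0' for _ in range(len(control) - len(info_sum_bin))) + info_sum_bin), 2)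
--         if info_sum_int == control_int:
--             is_error.append("No error")
--         else:
--             is_error.append("Error")
--     return is_error
-- ===== SOURCE B (Python) =====
-- def berger_check(_words):
--     # Stage 1: one incremental sweep builds a table mapping each word length n
--     # to its info/control split point k (the control width is nondecreasing in n,
--     # so a single running counter i serves every length).
--     max_n = max(map(len, _words), default=0)
--     k_of = [0] * (max_n + 1)
--     i = 1
--     for n in range(1, max_n + 1):
--         while 2 ** i + i <= n:
--             i += 1
--         k_of[n] = n - i
--     # Stage 2: map each word through the table; the word is valid iff the digit
--     # sum of the info part plus the control value is an all-ones number of the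
--     # control's width (widened if the sum alone needs more bits).
--     out = []
--     for word in _words:
--         k = k_of[len(word)]
--         s = sum(map(int, word[:k]))
--         total = s + int(word[k:], 2)
--         out.append("No error" if total == (1 << max(len(word) - k, s.bit_length())) - 1 else "Error")
--     return out
-- ===== Notes on version B (the rewrite author's own statement) =====
-- stated objective: alternative
-- what changed: B replaces A's per-word split-search loop by a length-to-split table built once in a single incremental sweep (the running counter i never restarts), and replaces A's whole bit-string pipeline (bin(), zero-padding, inverse(), re-parsing with int(,2)) by the all-ones test s + int(control,2) == 2**max(L, s.bit_length()) - 1.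
import Mathlib
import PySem

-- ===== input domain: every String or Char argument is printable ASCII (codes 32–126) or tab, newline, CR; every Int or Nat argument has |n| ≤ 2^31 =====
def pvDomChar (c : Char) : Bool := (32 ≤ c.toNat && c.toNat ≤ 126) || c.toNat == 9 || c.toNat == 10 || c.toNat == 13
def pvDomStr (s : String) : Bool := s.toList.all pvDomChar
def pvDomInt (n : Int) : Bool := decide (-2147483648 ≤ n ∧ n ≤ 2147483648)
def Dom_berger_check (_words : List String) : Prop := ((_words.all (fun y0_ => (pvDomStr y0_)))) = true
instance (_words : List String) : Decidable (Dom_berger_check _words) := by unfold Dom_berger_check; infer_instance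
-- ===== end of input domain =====

-- B builds a length→split-point table once in a single incremental sweep (instead of A's
-- per-word range-scan) and tests 's + int(control,2) == all-ones of the control width' by
-- integer arithmetic (instead of A's bin()/zero-pad/inverse()/re-parse string pipeline).


-- ===== PORT A =====
-- int(s, 2) hand-evaluated: exact on nonempty '0'/'1' strings, the only shape the derived
-- argument (inverse of a zero-padded bin()) takes on inputs admitted by Pre_.
def binVal (cs : List Char) : Int := cs.foldl (fun a c => 2 * a + (if c = '1' then 1 else 0)) 0

-- the 'for i in range(1, len(word)): if 2**i - 1 >= len(word) - i: k = ...; break' loop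
def kloopA (n : Int) : List Int → Int
  | [] => 0
  | i :: rest => if 2 ^ i.toNat - 1 ≥ n - i then n - i else kloopA n rest

-- A's per-word locals, one definition per Python assignment (cs = word's characters)
def aK (cs : List Char) : Int :=
  kloopA (PySem.List.len cs) (PySem.List.pyRange 1 (PySem.List.len cs) 1)
def aInfo (cs : List Char) : List Char := PySem.List.slice cs none (some (aK cs))          -- word[:k]
def aControl (cs : List Char) : List Char := PySem.List.slice cs (some (aK cs)) none       -- word[k:]
def aControlInt (cs : List Char) : Int :=
  (PySem.Int.ofCharsBase? (aControl cs) 2).getD 0   -- int(control, 2); none (ValueError) excluded by Pre_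
def aSum (cs : List Char) : Int :=
  ((aInfo cs).map (fun c => (PySem.Int.ofChars? [c]).getD 0)).sum   -- sum(map(int, info)); none excluded by Pre_
def aBin (cs : List Char) : List Char :=
  PySem.Int.toBinChars (aSum cs)   -- bin(·)[2:], exact since 0 ≤ aSum whenever Python reaches this point
def aPadded (cs : List Char) : List Char :=
  ((PySem.List.pyRange 0 (PySem.List.len (aControl cs) - PySem.List.len (aBin cs)) 1).map
    (fun _ => '0')) ++ aBin cs   -- ''.join('0' for _ in range(...)) + info_sum_bin
def aInv (cs : List Char) : List Char :=
  (aPadded cs).map (fun ch => if ch = '1' then '0' else '1')   -- inverse()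

def bergerWordA (w : String) : String :=
  if binVal (aInv w.toList) = aControlInt w.toList then "No error" else "Error"

def berger_check (_words : List String) : List String :=
  _words.foldl (fun acc w => acc ++ [bergerWordA w]) []

-- ===== PORT B =====
-- the 'while 2 ** i + i <= n: i += 1' inner loop of the table sweep
def bfindB (n : Int) (i : Nat) : Nat :=
  if h : 2 ^ i + (i : Int) ≤ n then bfindB n (i + 1) else i
termination_by (n - i).toNat
decreasing_by
  have h1 : (0 : Int) < 2 ^ i := by positivity
  omega

-- one iteration of 'for n in range(1, max_n + 1)': advance i, then 'k_of[n] = n - i'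
-- (n.toNat is exact: n comes from range(1, …) so 0 ≤ n)
def bStep (st : List Int × Nat) (n : Int) : List Int × Nat :=
  let i := bfindB n st.2
  (st.1.set n.toNat (n - i), i)

-- max_n = max(map(len, _words), default=0)
def bMaxN (_words : List String) : Int :=
  (PySem.List.max? (_words.map (fun w => PySem.List.len w.toList)) (fun x => x)).getD 0

-- k_of = [0] * (max_n + 1); the sweep 'for n in range(1, max_n + 1): …'
def bKof (_words : List String) : List Int :=
  ((PySem.List.pyRange 1 (bMaxN _words + 1) 1).foldl bStep
    (List.replicate (bMaxN _words + 1).toNat 0, 1)).1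

-- B's per-word locals (cs = word's characters, k the table entry)
def bS (cs : List Char) (k : Int) : Int :=
  ((PySem.List.slice cs none (some k)).map
    (fun c => (PySem.Int.ofChars? [c]).getD 0)).sum                       -- s = sum(map(int, word[:k]))
def bTotal (cs : List Char) (k : Int) : Int :=
  bS cs k + (PySem.Int.ofCharsBase? (PySem.List.slice cs (some k) none) 2).getD 0  -- s + int(word[k:], 2)

-- the .toNat on the exponent is exact: len(word) - k ≥ 0 for every table entry, so the
-- max is a nonnegative int exactly as in Python
def bergerWordB (kof : List Int) (w : String) : String :=
  let cs := w.toList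
  let k := PySem.List.pyGetD kof (PySem.List.len cs) 0                    -- k_of[len(word)]
  if bTotal cs k =
      2 ^ (max (PySem.List.len cs - k) (PySem.Int.bitLength (bS cs k) : Int)).toNat - 1
  then "No error" else "Error"

def berger_check_alt (_words : List String) : List String :=
  let kof := bKof _words
  _words.foldl (fun acc w => acc ++ [bergerWordB kof w]) []

-- ===== PRECONDITION & SPEC =====
-- the Berger control width of a word of length n: the least L ≥ 1 with 2^L - 1 ≥ n - L
-- (a spec-level bounded minimum, used only to STATE where A raises)
def minWidth (n : Nat) : Nat :=
  Nat.find (⟨n + 1, Nat.succ_pos n, by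
    have h1 : n < 2 ^ n := Nat.lt_two_pow_self
    have h2 : 2 ^ n ≤ 2 ^ (n + 1) := Nat.pow_le_pow_right (by norm_num) (by omega)
    omega⟩ : ∃ L, 0 < L ∧ n < 2 ^ L + L)

-- Pre_ is exactly the domain on which A returns: every word is nonempty, the characters of its
-- information part are decimal digits (otherwise int() raises ValueError) and its control part
-- parses as a base-2 int (otherwise int(·, 2) raises ValueError).
def Pre_berger_check (_words : List String) : Prop :=
  (_words.all (fun w =>
    !(w.toList.isEmpty) &&
    ((w.toList.take (w.toList.length - minWidth w.toList.length)).all PySem.Chars.isdigit) &&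
    (PySem.Int.ofCharsBase? (w.toList.drop (w.toList.length - minWidth w.toList.length)) 2).isSome)) = true
instance (_words : List String) : Decidable (Pre_berger_check _words) := by
  unfold Pre_berger_check; infer_instance

def pvWitness_berger_check : List String := ["110", "0", "90", "10111"]

def Spec_berger_check (_words : List String) (out : List String) : Prop := out = berger_check_alt _words
instance (_words : List String) (out : List String) : Decidable (Spec_berger_check _words out) := by unfold Spec_berger_check; infer_instance

-- ===== CLAIM (what is proved, stated in full; the proofs are below) =====
def Claim_equal_berger_check : Prop := ∀ (_words : List String), Dom_berger_check _words → Pre_berger_check _words → Spec_berger_check _words (berger_check _words)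

-- ===== LEMMAS AND PROOFS =====

-- the two split searches agree: scanning range(j, n) for the first i with 2^i - 1 ≥ n - i
-- returns n - (the while loop's first i ≥ j with 2^i + i > n)
lemma kloop_eq_bfind (n : Int) (j : Nat) (hj1 : 1 ≤ j) (hjn : (j : Int) ≤ n) :
    kloopA n (PySem.List.pyRange j n 1) = n - bfindB n j := by
  revert hj1 hjn
  induction j using bfindB.induct (n := n) with
  | case1 x h ih =>
    intro hj1 hjn
    have hp : (0 : Int) < 2 ^ x := by positivity
    have hxn : (x : Int) < n := by linarith
    rw [PySem.List.pyRange_one_cons hxn, bfindB, dif_pos h]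
    have hcond : ¬ (2 ^ ((x : Int)).toNat - 1 ≥ n - (x : Int)) := by
      rw [Int.toNat_natCast]
      linarith
    simp only [kloopA, if_neg hcond]
    have := ih (by omega) (by push_cast; linarith)
    rw [← this]
    norm_num
  | case2 x h =>
    intro hj1 hjn
    rw [bfindB, dif_neg h]
    rcases lt_or_eq_of_le hjn with hlt | heq
    · rw [PySem.List.pyRange_one_cons hlt]
      have hcond : 2 ^ ((x : Int)).toNat - 1 ≥ n - (x : Int) := by
        rw [Int.toNat_natCast]
        linarith [not_le.mp h]
      simp only [kloopA, if_pos hcond]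
    · rw [PySem.List.pyRange_one_eq_nil (le_of_eq heq.symm)]
      simp only [kloopA]
      omega

lemma bfind_spec (n : Int) (j : Nat) (hjn : (j : Int) ≤ n) :
    j ≤ bfindB n j ∧ (bfindB n j : Int) ≤ n ∧ n < 2 ^ (bfindB n j) + (bfindB n j : Int) := by
  revert hjn
  induction j using bfindB.induct (n := n) with
  | case1 x h ih =>
    intro hjn
    rw [bfindB, dif_pos h]
    have hp : (0 : Int) < 2 ^ x := by positivity
    have hx1 : ((x + 1 : Nat) : Int) ≤ n := by push_cast; linarith
    obtain ⟨h1, h2, h3⟩ := ih hx1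
    exact ⟨Nat.le_of_succ_le h1, h2, h3⟩
  | case2 x h =>
    intro hjn
    rw [bfindB, dif_neg h]
    exact ⟨le_refl x, hjn, by linarith [not_le.mp h]⟩

-- the while loop is minimal: everything below its result still satisfied the loop guard
lemma bfind_min (n : Int) (j m : Nat) (hjm : j ≤ m) (hm : m < bfindB n j) :
    2 ^ m + (m : Int) ≤ n := by
  revert hjm hm
  induction j using bfindB.induct (n := n) with
  | case1 x h ih =>
    intro hjm hm
    rw [bfindB, dif_pos h] at hm
    rcases Nat.eq_or_lt_of_le hjm with heq | hlt
    · exact heq ▸ h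
    · exact ih hlt hm
  | case2 x h =>
    intro hjm hm
    rw [bfindB, dif_neg h] at hm
    omega

-- the guard fails at the while loop's result
lemma bfind_guard_false (n : Int) (j : Nat) :
    ¬ (2 ^ (bfindB n j) + (bfindB n j : Int) ≤ n) := by
  induction j using bfindB.induct (n := n) with
  | case1 x h ih => rw [bfindB, dif_pos h]; exact ih
  | case2 x h => rw [bfindB, dif_neg h]; exact h

-- starting the while loop anywhere at or below its (from-1) result lands at the same place
lemma bfind_stable (n : Int) (j : Nat) (hj1 : 1 ≤ j) (hj2 : j ≤ bfindB n 1) :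
    bfindB n j = bfindB n 1 := by
  revert hj1 hj2
  induction j using bfindB.induct (n := n) with
  | case1 x h ih =>
    intro hj1 hj2
    rcases Nat.eq_or_lt_of_le hj2 with heq | hlt
    · exact absurd (heq ▸ h) (bfind_guard_false n 1)
    · rw [bfindB, dif_pos h]
      exact ih (by omega) hlt
  | case2 x h =>
    intro hj1 hj2
    rcases Nat.eq_or_lt_of_le hj2 with heq | hlt
    · rw [bfindB, dif_neg h, heq]
    · exact absurd (bfind_min n 1 x (by omega) hlt) h

-- the split width is nondecreasing in the word length
lemma bfind_mono (a b : Int) (ha : 1 ≤ a) (hab : a ≤ b) :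
    bfindB a 1 ≤ bfindB b 1 := by
  by_contra hcon
  push Not at hcon
  obtain ⟨hb1, _, _⟩ := bfind_spec b 1 (by omega)
  have hmin := bfind_min a 1 (bfindB b 1) hb1 hcon
  have hguard := bfind_guard_false b 1
  push Not at hguard
  linarith

-- the table sweep: after folding bStep over range(a, mEnd+1), entry n ≥ a holds n - i(n)
-- (with i(n) = bfindB n 1) and entries below a are untouched
lemma fold_bStep_get (mEnd : Nat) : ∀ (d a : Nat), mEnd + 1 - a = d →
    ∀ (tbl : List Int) (j : Nat), 1 ≤ a → 1 ≤ j → j ≤ bfindB (a : Int) 1 →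
    ∀ (n : Nat), n ≤ mEnd →
    (((PySem.List.pyRange (a : Int) ((mEnd : Int) + 1) 1).foldl bStep (tbl, j)).1)[n]? =
      if a ≤ n then (if n < tbl.length then some ((n : Int) - bfindB (n : Int) 1) else none)
      else tbl[n]? := by
  intro d
  induction d with
  | zero =>
    intro a hd tbl j ha hj1 hj2 n hn
    rw [PySem.List.pyRange_one_eq_nil (by omega)]
    simp only [List.foldl_nil]
    rw [if_neg (by omega)]
  | succ d ih =>
    intro a hd tbl j ha hj1 hj2 n hn
    have haM : a ≤ mEnd := by omega
    rw [PySem.List.pyRange_one_cons (by exact_mod_cast Nat.lt_succ_of_le haM)]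
    rw [List.foldl_cons]
    have hstep : bStep (tbl, j) (a : Int) =
        (tbl.set a ((a : Int) - bfindB (a : Int) 1), bfindB (a : Int) 1) := by
      simp only [bStep, bfind_stable (a : Int) j hj1 hj2, Int.toNat_natCast]
    rw [hstep]
    obtain ⟨hb1, _, _⟩ := bfind_spec (a : Int) 1 (by exact_mod_cast ha)
    have hmono : bfindB (a : Int) 1 ≤ bfindB ((a : Int) + 1) 1 :=
      bfind_mono (a : Int) ((a : Int) + 1) (by exact_mod_cast ha) (by omega)
    have hrec := ih (a + 1) (by omega) (tbl.set a ((a : Int) - bfindB (a : Int) 1))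
      (bfindB (a : Int) 1) (by omega) (by omega)
      (by push_cast; exact_mod_cast hmono) n hn
    rw [show ((a : Int) + 1) = ((a + 1 : Nat) : Int) by push_cast; ring]
    rw [hrec]
    rcases Nat.lt_trichotomy n a with hna | hna | hna
    · rw [if_neg (by omega), if_neg (by omega), List.getElem?_set_ne (by omega)]
    · subst hna
      rw [if_neg (by omega), if_pos (le_refl n)]
      by_cases hlen : n < tbl.length
      · rw [List.getElem?_set_self (by simpa using hlen), if_pos hlen]
      · rw [if_neg hlen, List.getElem?_eq_none (by simp; omega)]
    · simp only [List.length_set]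
      rw [if_pos (show a + 1 ≤ n by omega), if_pos (show a ≤ n by omega)]

-- foldl step of binVal is affine in the accumulator
lemma binVal_foldl (cs : List Char) (a : Int) :
    cs.foldl (fun a c => 2 * a + (if c = '1' then 1 else 0)) a = a * 2 ^ cs.length + binVal cs := by
  induction cs generalizing a with
  | nil => simp [binVal]
  | cons c cs ih =>
    simp only [binVal, List.foldl_cons, List.length_cons] at *
    rw [ih, ih (2 * 0 + if c = '1' then 1 else 0)]
    ring

lemma binVal_cons (c : Char) (cs : List Char) :
    binVal (c :: cs) = (if c = '1' then 1 else 0) * 2 ^ cs.length + binVal cs := by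
  have := binVal_foldl cs (2 * 0 + if c = '1' then 1 else 0)
  simp only [binVal, List.foldl_cons] at *
  rw [this]; ring

lemma binVal_zeros_append (m : Nat) (cs : List Char) :
    binVal (List.replicate m '0' ++ cs) = binVal cs := by
  induction m with
  | zero => simp
  | succ m ih =>
    rw [List.replicate_succ, List.cons_append, binVal_cons, ih]
    have : ¬ ('0' = '1') := by decide
    simp [this]

lemma binVal_inverse (cs : List Char) (hb : ∀ c ∈ cs, c = '0' ∨ c = '1') :
    binVal (cs.map (fun ch => if ch = '1' then '0' else '1')) = 2 ^ cs.length - 1 - binVal cs := by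
  induction cs with
  | nil => simp [binVal]
  | cons c cs ih =>
    rw [List.map_cons, binVal_cons, binVal_cons,
      ih (fun x hx => hb x (List.mem_cons_of_mem c hx)), List.length_map, List.length_cons]
    have h01 : ¬ ('0' = '1') := by decide
    rcases hb c List.mem_cons_self with h | h <;> subst h <;> simp [h01] <;> ring

-- one-step equations for core's Nat.toDigitsCore at base 2
lemma toDigitsCore_succ_base (f m : Nat) (acc : List Char) (h2 : m / 2 = 0) :
    Nat.toDigitsCore 2 (f + 1) m acc = [(m % 2).digitChar] ++ acc := by
  unfold Nat.toDigitsCore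
  simp [h2]

lemma toDigitsCore_succ_step (f m : Nat) (acc : List Char) (h2 : ¬ m / 2 = 0) :
    Nat.toDigitsCore 2 (f + 1) m acc = Nat.toDigitsCore 2 f (m / 2) ((m % 2).digitChar :: acc) := by
  conv_lhs => unfold Nat.toDigitsCore
  simp [h2]

-- Nat.toDigits 2: pure bits, and binVal recovers the number
lemma toDigitsCore_two (m : Nat) : ∀ (f : Nat) (acc : List Char), m < f →
    ∃ ds, Nat.toDigitsCore 2 f m acc = ds ++ acc ∧ (∀ c ∈ ds, c = '0' ∨ c = '1') ∧
      ds ≠ [] ∧ binVal ds = m := by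
  induction m using Nat.strong_induction_on with
  | _ m ih =>
    intro f acc hf
    match f with
    | f + 1 =>
      by_cases h2 : m / 2 = 0
      · have hm2 : m = 0 ∨ m = 1 := by omega
        refine ⟨[(m % 2).digitChar], ?_, ?_, by simp, ?_⟩
        · rw [toDigitsCore_succ_base f m acc h2]
        · rcases hm2 with h | h <;> subst h <;> norm_num [Nat.digitChar]
        · have hne01 : ¬ ('0' = '1') := by decide
          rcases hm2 with h | h <;> subst h <;> simp [Nat.digitChar, binVal, hne01]
      · have hlt : m / 2 < m := Nat.div_lt_self (by omega) (by omega)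
        have hf2 : m / 2 < f := by omega
        obtain ⟨ds, hds, hbits, hne, hval⟩ := ih (m / 2) hlt f ((m % 2).digitChar :: acc) hf2
        have h01 : m % 2 = 0 ∨ m % 2 = 1 := Nat.mod_two_eq_zero_or_one m
        refine ⟨ds ++ [(m % 2).digitChar], ?_, ?_, by simp, ?_⟩
        · rw [toDigitsCore_succ_step f m acc h2, hds, List.append_assoc, List.singleton_append]
        · intro c hc
          rcases List.mem_append.mp hc with h | h
          · exact hbits c h
          · simp only [List.mem_singleton] at h
            rcases h01 with h' | h' <;> subst h <;> rw [h'] <;> simp [Nat.digitChar]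
        · have haff : binVal (ds ++ [(m % 2).digitChar]) =
              binVal ds * 2 + (if (m % 2).digitChar = '1' then 1 else 0) := by
            simp only [binVal, List.foldl_append, List.foldl_cons, List.foldl_nil]
            ring
          rw [haff, hval]
          rcases h01 with h' | h' <;> rw [h'] <;> simp [Nat.digitChar] <;> omega

-- a decimal-digit character
lemma isdigit_bounds (c : Char) (h : PySem.Chars.isdigit c = true) :
    48 ≤ c.toNat ∧ c.toNat ≤ 57 := by
  simp only [PySem.Chars.isdigit, Bool.and_eq_true, decide_eq_true_eq] at h
  exact ⟨h.1, h.2⟩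

-- int(c) of a digit character is a nonnegative value
lemma ofChars_digit_nonneg (c : Char) (h : PySem.Chars.isdigit c = true) :
    0 ≤ (PySem.Int.ofChars? [c]).getD 0 := by
  obtain ⟨h1, h2⟩ := isdigit_bounds c h
  interval_cases hc : c.toNat <;> rw [← Char.ofNat_toNat c, hc] <;> decide

-- a bit string's value is below 2^length
lemma binVal_lt_two_pow (cs : List Char) (hb : ∀ c ∈ cs, c = '0' ∨ c = '1') :
    binVal cs < 2 ^ cs.length := by
  induction cs with
  | nil => simp [binVal]
  | cons c cs ih =>
    rw [binVal_cons, List.length_cons]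
    have h1 := ih (fun x hx => hb x (List.mem_cons_of_mem c hx))
    have hp : (0 : Int) < 2 ^ cs.length := by positivity
    rcases hb c List.mem_cons_self with h | h <;> subst h <;> simp [pow_succ] <;> linarith

-- the spec-level minimum in Pre_ is the while loop's result
lemma minWidth_eq (N : Nat) (hN : 1 ≤ N) : minWidth N = bfindB (N : Int) 1 := by
  obtain ⟨hi1, hiN, hipow⟩ := bfind_spec (N : Int) 1 (by exact_mod_cast hN)
  unfold minWidth
  rw [Nat.find_eq_iff]
  constructor
  · refine ⟨by omega, ?_⟩
    have h2 : ((2 : Int) ^ bfindB (N : Int) 1) = ((2 ^ bfindB (N : Int) 1 : Nat) : Int) := by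
      push_cast; ring
    rw [h2] at hipow
    omega
  · intro m hm hc
    obtain ⟨hm0, hmN⟩ := hc
    have := bfind_min (N : Int) 1 m (by omega) hm
    have h2 : ((2 : Int) ^ m) = ((2 ^ m : Nat) : Int) := by push_cast; ring
    rw [h2] at this
    omega

set_option maxHeartbeats 1000000 in
-- per word: given that the table lookup yields k = N - i(N), A's string check and B's
-- arithmetic check agree
lemma bergerWord_eq (kof : List Int) (w : String) (hne : w.toList ≠ [])
    (hdig : ∀ c ∈ w.toList.take (w.toList.length - minWidth w.toList.length),
      PySem.Chars.isdigit c = true)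
    (hlook : PySem.List.pyGetD kof (PySem.List.len w.toList) 0 =
      (w.toList.length : Int) - bfindB (w.toList.length : Int) 1) :
    bergerWordA w = bergerWordB kof w := by
  set cs := w.toList with hcs
  set N := cs.length with hNdef
  have hN : 1 ≤ N := List.length_pos_of_ne_nil hne
  set i := bfindB (N : Int) 1 with hidef
  obtain ⟨hi1, hiN', hipow⟩ := bfind_spec (N : Int) 1 (by exact_mod_cast hN)
  have hiN : i ≤ N := by exact_mod_cast hiN'
  have hMW : minWidth N = i := minWidth_eq N hN
  rw [hMW] at hdig
  -- the two split positions agree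
  have hKA : aK cs = (N : Int) - i := by
    unfold aK
    simp only [PySem.List.len_eq, ← hNdef]
    have := kloop_eq_bfind (N : Int) 1 (le_refl 1) (by exact_mod_cast hN)
    simpa [← hidef] using this
  set k : Int := PySem.List.pyGetD kof (PySem.List.len cs) 0 with hkdef
  have hKB : k = (N : Int) - i := hlook
  have hkk : ((N : Int) - i).toNat = N - i := by omega
  have hInfo : aInfo cs = cs.take (N - i) := by
    unfold aInfo
    rw [hKA, PySem.List.slice_to cs (by omega), hkk]
  have hControl : aControl cs = cs.drop (N - i) := by
    unfold aControl
    rw [hKA, PySem.List.slice_from cs (by omega), hkk]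
  -- both parse the same control characters
  have hCtl : aControlInt cs = (PySem.Int.ofCharsBase? (PySem.List.slice cs (some k) none) 2).getD 0 := by
    unfold aControlInt aControl
    rw [hKA, hKB]
  -- both compute the same digit sum, and it is nonnegative
  have hSB : bS cs k = aSum cs := by
    unfold bS aSum aInfo
    rw [hKA, hKB]
  have hs0 : 0 ≤ aSum cs := by
    unfold aSum
    apply List.sum_nonneg
    intro x hx
    obtain ⟨c, hc, rfl⟩ := List.mem_map.mp hx
    rw [hInfo] at hc
    exact ofChars_digit_nonneg c (hdig c hc)
  set m := (aSum cs).toNat with hmdef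
  have hm : (m : Int) = aSum cs := by omega
  -- bin(s) is a nonempty bit string of value s
  obtain ⟨ds, hds, hdbits, hdne, hdval⟩ := toDigitsCore_two m (m + 1) [] (Nat.lt_succ_self m)
  have htd : Nat.toDigits 2 m = ds := by
    show Nat.toDigitsCore 2 (m + 1) m [] = ds
    rw [hds, List.append_nil]
  have hBin : aBin cs = ds := by
    unfold aBin
    rw [← hm]
    show PySem.Int.toBinChars (m : Int) = ds
    simp only [PySem.Int.toBinChars]
    rw [if_neg (by omega), Int.toNat_natCast]
    exact htd
  have hCtlLen : (cs.drop (N - i)).length = i := by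
    simp [List.length_drop]; omega
  -- the zero padding (empty when bin(s) is already wider than the control part)
  have hPadded : aPadded cs = List.replicate (i - ds.length) '0' ++ ds := by
    unfold aPadded
    rw [hControl, hBin]
    simp only [PySem.List.len_eq, hCtlLen]
    rw [PySem.List.pyRange_zero, List.map_map]
    simp only [Function.comp_def, List.map_const', List.length_range]
    rw [show ((i : Int) - (ds.length : Int)).toNat = i - ds.length by omega]
  have hplen : (List.replicate (i - ds.length) '0' ++ ds).length = max i ds.length := by
    simp; omega
  have hpbits : ∀ c ∈ List.replicate (i - ds.length) '0' ++ ds, c = '0' ∨ c = '1' := by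
    intro c hc
    rcases List.mem_append.mp hc with h | h
    · exact Or.inl (List.eq_of_mem_replicate h)
    · exact hdbits c h
  -- the inverted padded string has value 2^max(i, len(bin(s))) - 1 - s
  have hInv : binVal (aInv cs) = 2 ^ max i ds.length - 1 - aSum cs := by
    unfold aInv
    rw [hPadded, binVal_inverse _ hpbits, hplen, binVal_zeros_append, hdval, hm]
  -- the length of bin(s) is s.bit_length() (or 1 when s = 0), so the widths agree
  have hWmax : max i ds.length = max i (PySem.Int.bitLength (aSum cs)) := by
    by_cases hm0 : m = 0
    · have hds0 : ds = ['0'] := by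
        rw [← htd, hm0]
        decide
      rw [hds0, ← hm, hm0]
      simp
      omega
    · set bl := PySem.Int.bitLength (aSum cs) with hbl
      have hblm : bl = PySem.Int.bitLength ((m : Nat) : Int) := by rw [hbl, ← hm]
      have hlt : m < 2 ^ bl := by
        have h := PySem.Int.lt_two_pow_bitLength ((m : Nat) : Int)
        rw [← hblm] at h
        simpa using h
      have hblpos : 0 < bl := by
        rcases Nat.eq_zero_or_pos bl with h0 | h0
        · rw [h0] at hlt
          omega
        · exact h0
      have hle : ds.length ≤ bl := by
        have h := Nat.toDigits_length 2 m bl hblpos hlt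
        rwa [htd] at h
      have hge : bl ≤ ds.length := by
        have h1 : 2 ^ (bl - 1) ≤ m := by
          have h := PySem.Int.two_pow_bitLength_le ((m : Nat) : Int) (by exact_mod_cast hm0)
          rw [← hblm] at h
          simpa using h
        have h2 : (m : Int) < 2 ^ ds.length := by
          rw [← hdval]
          exact binVal_lt_two_pow ds hdbits
        have h3 : m < 2 ^ ds.length := by
          have hcast : ((2 : Int) ^ ds.length) = ((2 ^ ds.length : Nat) : Int) := by
            push_cast; ring
          rw [hcast] at h2
          omega
        have h4 : 2 ^ (bl - 1) < 2 ^ ds.length := lt_of_le_of_lt h1 h3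
        have h5 : bl - 1 < ds.length := (Nat.pow_lt_pow_iff_right (by norm_num)).mp h4
        omega
      omega
  -- B's exponent is the same width
  have hWB : (max (PySem.List.len cs - k) (PySem.Int.bitLength (aSum cs) : Int)).toNat =
      max i ds.length := by
    rw [hKB, hWmax]
    simp only [PySem.List.len_eq, ← hNdef]
    omega
  -- and the two checks are the same equation rearranged
  unfold bergerWordA bergerWordB
  simp only [← hcs, ← hkdef, bTotal, hSB, hInv, hCtl]
  rw [hWB]
  set M := (2 : Int) ^ max i ds.length
  set c := (PySem.Int.ofCharsBase? (PySem.List.slice cs (some k) none) 2).getD 0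
  by_cases h : M - 1 - aSum cs = c
  · rw [if_pos h, if_pos (by omega)]
  · rw [if_neg h, if_neg (by omega)]

-- the table lookup is correct for every word in the list (under Pre_: words are nonempty)
lemma kof_lookup (_words : List String) (w : String) (hw : w ∈ _words) (hne : w.toList ≠ []) :
    PySem.List.pyGetD (bKof _words) (PySem.List.len w.toList) 0 =
      (w.toList.length : Int) - bfindB (w.toList.length : Int) 1 := by
  set N := w.toList.length with hNdef
  have hN : 1 ≤ N := List.length_pos_of_ne_nil hne
  have hmem : (N : Int) ∈ _words.map (fun w => PySem.List.len w.toList) := by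
    simp only [List.mem_map]
    exact ⟨w, hw, by simp [← hNdef]⟩
  have hne' : _words.map (fun w => PySem.List.len w.toList) ≠ [] := by
    intro h
    rw [h] at hmem
    exact absurd hmem (List.not_mem_nil)
  obtain ⟨mx, hmx⟩ : ∃ mx, PySem.List.max? (_words.map (fun w => PySem.List.len w.toList))
      (fun x => x) = some mx := by
    cases h : PySem.List.max? (_words.map (fun w => PySem.List.len w.toList)) (fun x => x) with
    | none => exact absurd ((PySem.List.max?_eq_none_iff _ _).mp h) hne'
    | some m => exact ⟨m, rfl⟩
  have hmax : bMaxN _words = mx := by unfold bMaxN; rw [hmx]; rfl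
  have hNle : (N : Int) ≤ mx := by simpa using PySem.List.max?_isMax hmx _ hmem
  have hmx0 : 0 ≤ mx := le_trans (Int.natCast_nonneg N) hNle
  set mEnd := mx.toNat with hmEnd
  have hmxcast : mx = (mEnd : Int) := by omega
  have hNm : N ≤ mEnd := by omega
  have hget := fold_bStep_get mEnd (mEnd + 1 - 1) 1 (by omega)
    (List.replicate (mEnd + 1) 0) 1 (le_refl 1) (le_refl 1)
    (bfind_spec 1 1 (by norm_num)).1 N hNm
  rw [if_pos hN, if_pos (by simp only [List.length_replicate]; omega)] at hget
  simp only [Nat.cast_one] at hget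
  have hkof : bKof _words =
      ((PySem.List.pyRange 1 ((mEnd : Int) + 1) 1).foldl bStep
        (List.replicate (mEnd + 1) 0, 1)).1 := by
    unfold bKof
    rw [hmax, hmxcast, show ((mEnd : Int) + 1).toNat = mEnd + 1 by omega]
  have hlen : (((PySem.List.pyRange 1 ((mEnd : Int) + 1) 1).foldl bStep
      (List.replicate (mEnd + 1) 0, 1)).1).length = mEnd + 1 := by
    have : ∀ (l : List Int) (st : List Int × Nat),
        ((l.foldl bStep st).1).length = st.1.length := by
      intro l
      induction l with
      | nil => intro st; rfl
      | cons x xs ih =>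
        intro st
        rw [List.foldl_cons, ih]
        simp [bStep]
    rw [this, List.length_replicate]
  rw [hkof]
  simp only [PySem.List.len_eq, ← hNdef]
  rw [PySem.List.pyGetD_eq_getElem _ _ (Int.natCast_nonneg N)
    (by rw [hlen]; exact_mod_cast Nat.lt_succ_of_le hNm)]
  simp only [Int.toNat_natCast]
  rw [List.getElem_eq_iff (by rw [hlen]; omega)]
  exact hget

-- ===== VERDICT (by name: the statement is the Claim_ definition above) =====
theorem berger_check_spec : Claim_equal_berger_check := by
  intro ws _ hpre
  unfold Pre_berger_check at hpre
  rw [List.all_eq_true] at hpre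
  unfold Spec_berger_check berger_check berger_check_alt
  simp only [PySem.List.foldl_append_singleton_eq_map, List.nil_append]
  refine List.map_congr_left (fun w hw => ?_)
  have h2 := hpre w hw
  simp only [Bool.and_eq_true, Bool.not_eq_true', List.all_eq_true] at h2
  have hne : w.toList ≠ [] := by
    intro hnil
    rw [hnil] at h2
    simp at h2
  exact bergerWord_eq (bKof ws) w hne h2.1.2 (kof_lookup ws w hw hne)
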